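-- pv_equiv track=rewrite | github.com/Ikar1988/Dominoes | dominoes.py | get_max_piece
-- ===== SOURCE A (Python) =====
-- def get_max_piece(pieces):
--     max_value = None
--     max_pair_value = None
--
--     for i in range(len(pieces)):
--         item = pieces[i]
--         item_sum = sum(item)
--         if not max_value or sum(max_value) < item_sum:
--             max_value = item
--
--         if item[0] == item[1] and (not max_pair_value or sum(max_pair_value) < item_sum):
--             max_pair_value = item
--
--     if max_pair_value:
--         return max_pair_value
--     else:
--         return max_value
-- ===== SOURCE B (Python) =====
-- def get_max_piece(pieces):
--     if not pieces:
--         return None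
--     doubles = [p for p in pieces if p[0] == p[1]]
--     return max(doubles or pieces, key=sum)
-- ===== Notes on version B (the rewrite author's own statement) =====
-- stated objective: idiomatic
-- what changed: Replaces the single manual index loop maintaining two running-maximum accumulators with a filter for doubles followed by one library max(key=sum) over doubles-or-all, relying on max returning the first maximal element.
-- outside the precondition, e.g. on get_max_piece([]): A returns None, B returns None
import Mathlib
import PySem

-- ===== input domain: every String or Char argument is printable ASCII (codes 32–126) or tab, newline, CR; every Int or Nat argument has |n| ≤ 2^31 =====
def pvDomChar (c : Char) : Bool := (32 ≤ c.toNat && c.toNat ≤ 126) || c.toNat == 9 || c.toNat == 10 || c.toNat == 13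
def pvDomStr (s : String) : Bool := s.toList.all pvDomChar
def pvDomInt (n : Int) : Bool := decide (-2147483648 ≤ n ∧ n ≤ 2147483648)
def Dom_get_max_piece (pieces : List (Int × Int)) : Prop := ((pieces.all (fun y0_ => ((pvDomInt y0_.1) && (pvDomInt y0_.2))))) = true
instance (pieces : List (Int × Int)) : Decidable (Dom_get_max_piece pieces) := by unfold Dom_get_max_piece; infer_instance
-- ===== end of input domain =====

-- B: filter the doubles once and take one library max(key=sum) over doubles-or-all
-- instead of A's manual index loop with two running-maximum accumulators (idiomatic, same cost).

-- ===== PORT A =====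
-- the duplicated 'not acc or sum(acc) < item_sum: acc = item' update of A, as a helper
def pvUpd (acc : Option (Int × Int)) (item : Int × Int) : Option (Int × Int) :=
  match acc with
  | none => some item
  | some m => if m.1 + m.2 < item.1 + item.2 then some item else some m

def get_max_piece (pieces : List (Int × Int)) : Int × Int :=
  let st := pieces.foldl
    (fun (st : Option (Int × Int) × Option (Int × Int)) item =>
      (pvUpd st.1 item, if item.1 = item.2 then pvUpd st.2 item else st.2))
    (none, none)
  match st.2 with
  | some p => p
  | none => st.1.getD (0, 0)   -- (0,0) is unreachable under Pre_: Python A returns None only on []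

-- ===== PORT B =====
def get_max_piece_alt (pieces : List (Int × Int)) : Int × Int :=
  let doubles := pieces.filter (fun p => p.1 == p.2)
  let cand := if doubles = [] then pieces else doubles   -- 'doubles or pieces'
  (PySem.List.max? cand (fun p => p.1 + p.2)).getD (0, 0)  -- max(cand, key=sum); [] (→ Python None) is outside Pre_

-- ===== PRECONDITION & SPEC =====
-- Pre_ excludes only the empty list, where Python A returns None (no value of type Int × Int).
def Pre_get_max_piece (pieces : List (Int × Int)) : Prop := pieces ≠ []
instance (pieces : List (Int × Int)) : Decidable (Pre_get_max_piece pieces) := by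
  unfold Pre_get_max_piece; infer_instance
def pvWitness_get_max_piece : (List (Int × Int)) := [(2, 3), (1, 1)]
def Spec_get_max_piece (pieces : List (Int × Int)) (out : Int × Int) : Prop := out = get_max_piece_alt pieces
instance (pieces : List (Int × Int)) (out : Int × Int) : Decidable (Spec_get_max_piece pieces out) := by unfold Spec_get_max_piece; infer_instance

-- ===== CLAIM (what is proved, stated in full; the proofs are below) =====
def Claim_equal_get_max_piece : Prop := ∀ (pieces : List (Int × Int)), Dom_get_max_piece pieces → Pre_get_max_piece pieces → Spec_get_max_piece pieces (get_max_piece pieces)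

-- ===== LEMMAS AND PROOFS =====

-- ===== VERDICT (by name: the statement is the Claim_ definition above) =====
-- A's paired fold splits into one pvUpd fold over all pieces and one over the doubles
theorem pv_fold_split (xs : List (Int × Int)) (mv mp : Option (Int × Int)) :
    xs.foldl
      (fun (st : Option (Int × Int) × Option (Int × Int)) item =>
        (pvUpd st.1 item, if item.1 = item.2 then pvUpd st.2 item else st.2))
      (mv, mp)
    = (xs.foldl pvUpd mv, (xs.filter (fun p => p.1 == p.2)).foldl pvUpd mp) := by
  induction xs generalizing mv mp with
  | nil => rfl
  | cons x t ih =>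
    simp only [List.foldl_cons, List.filter_cons]
    by_cases h : x.1 = x.2
    · simp [h, ih]
    · simp [h, ih]

-- A's running-max update folded from None is exactly PySem's max? with key = sum
theorem pv_fold_max? (xs : List (Int × Int)) :
    xs.foldl pvUpd none = PySem.List.max? xs (fun p : Int × Int => p.1 + p.2) := by
  simp only [PySem.List.max?]
  congr 1
  funext acc item
  cases acc <;> rfl

theorem get_max_piece_spec : Claim_equal_get_max_piece := by
  unfold Claim_equal_get_max_piece
  intro pieces _ _
  unfold Spec_get_max_piece get_max_piece get_max_piece_alt
  simp only [pv_fold_split, pv_fold_max?]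
  by_cases h : pieces.filter (fun p => p.1 == p.2) = []
  · simp [h, PySem.List.max?]
  · have hne : PySem.List.max? (pieces.filter (fun p => p.1 == p.2))
        (fun p : Int × Int => p.1 + p.2) ≠ none := by
      intro hn
      exact h ((PySem.List.max?_eq_none_iff _ _).mp hn)
    rcases Option.ne_none_iff_exists'.mp hne with ⟨m, hm⟩
    simp [h, hm]
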